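-- pv_equiv track=rewrite | github.com/adamrichardturner/python-algorithms | pair_zeros.py | pair_zeros
-- ===== SOURCE A (Python) =====
-- def pair_zeros(arr):
--     """
--     For a given list of digits 0 to 9, return a list with the same digits
--     in the same order, but with all 0s paired. Pairing two 0s generates one
--     0 at the location of the first one.
--
--     E.G
--
--     input: [0, 1, 7, 0, 2, 2, 0, 0, 1, 0]
--     paired: ^--------^        ^--^
--         -> [0, 1, 7,    2, 2, 0,    1, 0]
--                         kept: ^        ^
--     """
--     # Indices of all the zeros stored here...
--     indices = []
--     # For each index and number in the arr...
--     for i, n in enumerate(arr):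
--         # If the number is 0, append its index to indices...
--         if n == 0:
--             indices.append(i)
--     # Store our indices to take away from arr here...
--     take_away = []
--     # For each index and number in the indices...
--     for i, n in enumerate(indices):
--         # If the index is odd, append it to the take_away list
--         if i % 2 != 0:
--             take_away.append(n)
--     # Return the numbers in arr if they are not at the indices held in take_away
--     return [num for index, num in enumerate(arr) if index not in take_away]
-- ===== SOURCE B (Python) =====
-- def pair_zeros(arr):
--     # Single streaming pass: keep the first zero of each pair, drop the second.
--     result = []
--     paired = False
--     for n in arr:
--         if n == 0:
--             if paired:
--                 paired = False
--             else:
--                 result.append(n)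
--                 paired = True
--         else:
--             result.append(n)
--     return result
-- ===== Notes on version B (the rewrite author's own statement) =====
-- stated objective: simpler
-- what changed: Replaces the three passes (collect zero indices, select odd-positioned indices, filter by index membership) with one streaming pass over the values that toggles a boolean 'paired' flag, building no index lists at all.
import Mathlib
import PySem

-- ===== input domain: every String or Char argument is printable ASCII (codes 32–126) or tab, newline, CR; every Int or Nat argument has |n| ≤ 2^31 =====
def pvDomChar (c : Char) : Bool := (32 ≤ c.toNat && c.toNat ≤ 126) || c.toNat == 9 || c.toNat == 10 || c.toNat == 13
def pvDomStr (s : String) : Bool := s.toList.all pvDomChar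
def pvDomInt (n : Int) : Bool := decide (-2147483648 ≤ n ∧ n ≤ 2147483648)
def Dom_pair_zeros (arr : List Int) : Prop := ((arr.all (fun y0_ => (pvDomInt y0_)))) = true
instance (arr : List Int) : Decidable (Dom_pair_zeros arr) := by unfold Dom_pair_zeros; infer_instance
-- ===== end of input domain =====

-- B replaces A's three index-building passes with one streaming pass over the
-- values that toggles a boolean 'paired' flag (objective: simpler).

-- ===== PORT A =====
-- indices = [i for i, n in enumerate(arr) if n == 0]  (A's explicit append loop)
def pair_zeros_indices (arr : List Int) : List Int :=
  (PySem.List.enumerate arr 0).foldl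
    (fun acc p => if p.2 == 0 then acc ++ [p.1] else acc) ([] : List Int)

-- take_away = [n for i, n in enumerate(indices) if i % 2 != 0]
def pair_zeros_takeaway (indices : List Int) : List Int :=
  (PySem.List.enumerate indices 0).foldl
    (fun acc p => if PySem.Int.mod p.1 2 != 0 then acc ++ [p.2] else acc) ([] : List Int)

-- [num for index, num in enumerate(arr) if index not in take_away]
def pair_zeros (arr : List Int) : List Int :=
  (PySem.List.enumerate arr 0).foldl
    (fun acc p =>
      if !((pair_zeros_takeaway (pair_zeros_indices arr)).contains p.1)
      then acc ++ [p.2] else acc) ([] : List Int)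

-- ===== PORT B =====
def pair_zeros_alt (arr : List Int) : List Int :=
  (arr.foldl
    (fun (st : List Int × Bool) n =>
      if n == 0 then
        if st.2 then (st.1, false)
        else (st.1 ++ [n], true)
      else (st.1 ++ [n], st.2))
    (([] : List Int), false)).1

-- ===== PRECONDITION & SPEC =====
def Spec_pair_zeros (arr : List Int) (out : List Int) : Prop := out = pair_zeros_alt arr
instance (arr : List Int) (out : List Int) : Decidable (Spec_pair_zeros arr out) := by unfold Spec_pair_zeros; infer_instance

-- ===== CLAIM (what is proved, stated in full; the proofs are below) =====
def Claim_equal_pair_zeros : Prop := ∀ (arr : List Int), Dom_pair_zeros arr → Spec_pair_zeros arr (pair_zeros arr)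

-- ===== LEMMAS AND PROOFS =====

-- zero positions of the list, counting from s
def pvZs (s : Int) : List Int → List Int
  | [] => []
  | x :: xs => if x == 0 then s :: pvZs (s + 1) xs else pvZs (s + 1) xs

-- elements at odd positions (b = true: the next element is odd-positioned)
def pvOdd (b : Bool) : List Int → List Int
  | [] => []
  | z :: l => if b then z :: pvOdd false l else pvOdd true l

-- B's streaming pass, as a structural recursion
def pvGo (b : Bool) : List Int → List Int
  | [] => []
  | x :: xs => if x == 0 then (if b then pvGo false xs else x :: pvGo true xs)
               else x :: pvGo b xs

lemma pvZs_eq (arr : List Int) : ∀ (s : Int),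
    (((PySem.List.enumerate arr s).filter (fun p => p.2 == 0)).map (·.1)) = pvZs s arr := by
  induction arr with
  | nil => intro s; simp [pvZs]
  | cons x xs ih =>
    intro s
    by_cases hx : x = 0 <;>
      simp [PySem.List.enumerate_cons, pvZs, hx, ih]

lemma pvOdd_eq (l : List Int) : ∀ (s : Int),
    (((PySem.List.enumerate l s).filter (fun p => PySem.Int.mod p.1 2 != 0)).map (·.2))
      = pvOdd (PySem.Int.mod s 2 != 0) l := by
  induction l with
  | nil => intro s; simp [pvOdd]
  | cons z l ih =>
    intro s
    have h2 : (0 : Int) < 2 := by omega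
    have hs := PySem.Int.mod_eq_emod_of_pos (a := s) h2
    have hs1 := PySem.Int.mod_eq_emod_of_pos (a := s + 1) h2
    have hb := Int.emod_two_eq_zero_or_one s
    rcases hb with h | h
    · have hE : s % 2 = 0 := h
      have hE1 : (s + 1) % 2 = 1 := by omega
      have ih' := ih (s + 1)
      simp [hE1] at ih'
      simp [PySem.List.enumerate_cons, pvOdd, hE, ih']
    · have hE : s % 2 = 1 := h
      have hE1 : (s + 1) % 2 = 0 := by omega
      have ih' := ih (s + 1)
      simp [hE1] at ih'
      simp [PySem.List.enumerate_cons, pvOdd, hE, ih']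

lemma pvZs_ge (arr : List Int) : ∀ (s : Int), ∀ t ∈ pvZs s arr, s ≤ t := by
  induction arr with
  | nil => intro s t ht; simp [pvZs] at ht
  | cons x xs ih =>
    intro s t ht
    by_cases hx : x = 0 <;> simp [pvZs, hx] at ht
    · rcases ht with h | h
      · omega
      · have := ih (s + 1) t h; omega
    · have := ih (s + 1) t ht; omega

lemma pvOdd_subset (l : List Int) : ∀ (b : Bool), ∀ t ∈ pvOdd b l, t ∈ l := by
  induction l with
  | nil => intro b t ht; simp [pvOdd] at ht
  | cons z l ih =>
    intro b t ht
    cases b <;> simp [pvOdd] at ht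
    · exact List.mem_cons_of_mem _ (ih _ _ ht)
    · rcases ht with h | h
      · simp [h]
      · exact List.mem_cons_of_mem _ (ih _ _ h)

lemma pvMain (xs : List Int) : ∀ (s : Int) (b : Bool) (pre : List Int),
    (∀ t ∈ pre, t < s) →
    (((PySem.List.enumerate xs s).filter
        (fun p => !((pre ++ pvOdd b (pvZs s xs)).contains p.1))).map (·.2)) = pvGo b xs := by
  induction xs with
  | nil => intro s b pre _; simp [pvZs, pvOdd, pvGo]
  | cons x xs ih =>
    intro s b pre hpre
    have hk1 : s ∉ pre := fun h => absurd (hpre s h) (by omega)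
    have hk2 : ∀ (b' : Bool), s ∉ pvOdd b' (pvZs (s + 1) xs) := by
      intro b' h
      have := pvZs_ge xs (s + 1) s (pvOdd_subset _ _ _ h)
      omega
    have hpre' : ∀ t ∈ pre, t < s + 1 := fun t ht => by have := hpre t ht; omega
    by_cases hx : x = 0
    · cases b with
      | false =>
        -- first zero of a pair: kept
        have ih' := ih (s + 1) true pre hpre'
        simp [List.contains_eq_mem] at ih'
        simp [PySem.List.enumerate_cons, pvZs, pvOdd, pvGo, hx,
              List.contains_eq_mem, hk1, hk2 true, ih']
      | true =>
        -- second zero of a pair: dropped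
        have hT : pre ++ pvOdd true (pvZs s (x :: xs))
            = (pre ++ [s]) ++ pvOdd false (pvZs (s + 1) xs) := by
          simp [pvZs, pvOdd, hx]
        rw [PySem.List.enumerate_cons, List.filter_cons, hT]
        have hdrop : (!(((pre ++ [s]) ++ pvOdd false (pvZs (s + 1) xs)).contains s)) = false := by
          simp [List.contains_eq_mem]
        simp only [hdrop, Bool.false_eq_true, if_false]
        have hpre2 : ∀ t ∈ pre ++ [s], t < s + 1 := by
          intro t ht
          rcases List.mem_append.mp ht with h | h
          · have := hpre t h; omega
          · simp at h; omega
        rw [ih (s + 1) false (pre ++ [s]) hpre2]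
        simp [pvGo, hx]
    · -- non-zero element: kept, flag unchanged
      have hz : pvZs s (x :: xs) = pvZs (s + 1) xs := by simp [pvZs, hx]
      rw [PySem.List.enumerate_cons, hz, List.filter_cons]
      have hkeep : (!((pre ++ pvOdd b (pvZs (s + 1) xs)).contains s)) = true := by
        simp [List.contains_eq_mem]
        exact ⟨hk1, hk2 b⟩
      simp only [hkeep, if_true]
      rw [List.map_cons, ih (s + 1) b pre hpre']
      simp [pvGo, hx]

lemma pvAlt_go (xs : List Int) : ∀ (acc : List Int) (b : Bool),
    (xs.foldl
      (fun (st : List Int × Bool) n =>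
        if n == 0 then
          if st.2 then (st.1, false)
          else (st.1 ++ [n], true)
        else (st.1 ++ [n], st.2)) (acc, b)).1 = acc ++ pvGo b xs := by
  induction xs with
  | nil => intro acc b; simp [pvGo]
  | cons x xs ih =>
    intro acc b
    by_cases hx : x = 0
    · cases b with
      | false => simpa [pvGo, hx] using ih (acc ++ [x]) true
      | true => simpa [pvGo, hx] using ih acc false
    · simpa [pvGo, hx] using ih (acc ++ [x]) b

-- ===== VERDICT (by name: the statement is the Claim_ definition above) =====
theorem pair_zeros_spec : Claim_equal_pair_zeros := by
  intro arr _
  show pair_zeros arr = pair_zeros_alt arr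
  have hI : pair_zeros_indices arr = pvZs 0 arr := by
    unfold pair_zeros_indices
    rw [PySem.List.foldl_append_if (fun p : Int × Int => p.2 == 0) (fun p : Int × Int => p.1)]
    simpa using pvZs_eq arr 0
  have hT : pair_zeros_takeaway (pvZs 0 arr) = pvOdd false (pvZs 0 arr) := by
    unfold pair_zeros_takeaway
    rw [PySem.List.foldl_append_if (fun p : Int × Int => PySem.Int.mod p.1 2 != 0) (fun p : Int × Int => p.2)]
    simpa using pvOdd_eq (pvZs 0 arr) 0
  unfold pair_zeros pair_zeros_alt
  rw [hI, hT,
      PySem.List.foldl_append_if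
        (fun p : Int × Int => !((pvOdd false (pvZs 0 arr)).contains p.1)) (fun p : Int × Int => p.2),
      pvAlt_go arr [] false]
  simpa using pvMain arr 0 false [] (by intro t ht; simp at ht)
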